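-- pv_equiv track=rewrite | github.com/Lautarocuello98/Encryption-System | project.py | custom_encrypt
-- ===== SOURCE A (Python) =====
-- def custom_encrypt(text):
--     hex_output = ""
--
--     for char in text:
--         value = ord(char) + 4
--         hex_value = hex(value)[2:]
--         if len(hex_value) == 1:
--             hex_value = "0" + hex_value
--         hex_output += hex_value
--
--     return hex_output[::-1]
-- ===== SOURCE B (Python) =====
-- _HEX = "0123456789abcdef"
--
-- def custom_encrypt(text):
--     out = []
--     for char in reversed(text):
--         v = ord(char) + 4
--         out.append(_HEX[v & 15])
--         out.append(_HEX[v >> 4])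
--     return ''.join(out)
-- ===== Notes on version B (the rewrite author's own statement) =====
-- stated objective: alternative
-- what changed: B never formats hex strings at all: it walks the text backwards and emits the two output digits of each character directly by arithmetic nibble extraction (v&15 then v>>4) from a digit table, so there is no hex() call, no zero-padding branch, no chunk reversal and no final global [::-1].
import Mathlib
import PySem

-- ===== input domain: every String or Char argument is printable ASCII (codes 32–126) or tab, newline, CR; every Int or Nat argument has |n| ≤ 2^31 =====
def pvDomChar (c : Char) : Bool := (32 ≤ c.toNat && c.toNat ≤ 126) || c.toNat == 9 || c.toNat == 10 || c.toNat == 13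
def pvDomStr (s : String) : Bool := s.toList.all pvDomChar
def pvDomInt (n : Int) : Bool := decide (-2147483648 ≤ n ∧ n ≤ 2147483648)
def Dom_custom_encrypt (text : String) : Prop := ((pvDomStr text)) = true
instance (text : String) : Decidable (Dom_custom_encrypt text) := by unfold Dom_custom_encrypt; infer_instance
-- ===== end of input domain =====

-- B emits each character's two output digits directly by arithmetic nibble extraction
-- (v & 15, v >> 4) from a digit table while walking the text backwards: no hex
-- formatting, no padding branch, no final reverse (objective: alternative algorithm).

-- ===== PORT A =====
-- one lowercase hex digit (0-15)
def pvHexDigit (n : Nat) : Char :=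
  if n < 10 then Char.ofNat (48 + n) else Char.ofNat (87 + n)

-- hex(n)[2:] for n ≥ 1: lowercase hex digits, no prefix, most significant first
def pvHexDigits (n : Nat) : List Char :=
  if h : n < 16 then [pvHexDigit n]
  else pvHexDigits (n / 16) ++ [pvHexDigit (n % 16)]
decreasing_by exact Nat.div_lt_self (by omega) (by omega)

def custom_encrypt (text : String) : String :=
  let hex_output := text.toList.foldl (fun acc c =>
    let value := c.toNat + 4
    let hex_value := pvHexDigits value
    let hex_value := if hex_value.length == 1 then '0' :: hex_value else hex_value
    acc ++ hex_value) []
  String.mk hex_output.reverse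

-- ===== PORT B =====
-- the digit table _HEX = "0123456789abcdef" (indexed, always in range in B)
def pvHexTable : List Char := "0123456789abcdef".toList

def custom_encrypt_alt (text : String) : String :=
  String.mk (text.toList.reverse.foldl (fun out c =>
    let v := c.toNat + 4
    out ++ [pvHexTable.getD (v % 16) '0', pvHexTable.getD (v / 16) '0']) [])

-- ===== PRECONDITION & SPEC =====
def Spec_custom_encrypt (text : String) (out : String) : Prop := out = custom_encrypt_alt text
instance (text : String) (out : String) : Decidable (Spec_custom_encrypt text out) := by unfold Spec_custom_encrypt; infer_instance

-- ===== CLAIM (what is proved, stated in full; the proofs are below) =====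
def Claim_equal_custom_encrypt : Prop := ∀ (text : String), Dom_custom_encrypt text → Spec_custom_encrypt text (custom_encrypt text)

-- ===== LEMMAS AND PROOFS =====
theorem hexTable_getD (n : Nat) (h : n < 16) : pvHexTable.getD n '0' = pvHexDigit n := by
  interval_cases n <;> decide

-- A's foldl-append followed by the global reverse, as a flatten over the reversed list
theorem fold_reverse (g : Char → List Char) (l : List Char) (acc : List Char) :
    (l.foldl (fun acc c => acc ++ g c) acc).reverse
      = (l.reverse.map (fun c => (g c).reverse)).flatten ++ acc.reverse := by
  induction l generalizing acc with
  | nil => simp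
  | cons a t ih =>
    rw [List.foldl_cons, ih]
    simp [List.flatten_append, List.reverse_append, List.append_assoc]

-- B's foldl-append as a flatten over a map
theorem fold_flatten (g : Char → List Char) (l : List Char) (acc : List Char) :
    l.foldl (fun out c => out ++ g c) acc = acc ++ (l.map g).flatten := by
  induction l generalizing acc with
  | nil => simp
  | cons a t ih => simp [List.foldl_cons, ih]

-- A's padded chunk, reversed, is exactly B's two nibble digits (for codes < 252)
theorem chunk_rev_eq (v : Nat) (hv : v < 256) :
    ((if (pvHexDigits v).length == 1 then '0' :: pvHexDigits v else pvHexDigits v)).reverse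
      = [pvHexTable.getD (v % 16) '0', pvHexTable.getD (v / 16) '0'] := by
  have hm16 : v % 16 < 16 := Nat.mod_lt _ (by omega)
  by_cases h16 : v < 16
  · have h0 : v / 16 = 0 := Nat.div_eq_of_lt h16
    have hm : v % 16 = v := Nat.mod_eq_of_lt h16
    rw [pvHexDigits, dif_pos h16, hexTable_getD _ hm16, hexTable_getD _ (by omega : v / 16 < 16),
      h0, hm]
    simp [pvHexDigit]
  · have hd : v / 16 < 16 := by omega
    rw [pvHexDigits, dif_neg h16, pvHexDigits, dif_pos hd, hexTable_getD _ hm16,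
      hexTable_getD _ hd]
    simp

-- every character of a Dom string has a code < 252
theorem dom_code_lt (c : Char) (h : pvDomChar c = true) : c.toNat + 4 < 256 := by
  simp [pvDomChar] at h
  omega

-- ===== VERDICT (by name: the statement is the Claim_ definition above) =====
theorem custom_encrypt_spec : Claim_equal_custom_encrypt := by
  intro text hdom
  show custom_encrypt text = custom_encrypt_alt text
  unfold custom_encrypt custom_encrypt_alt
  simp only []
  rw [fold_reverse (fun c => if (pvHexDigits (c.toNat + 4)).length == 1
        then '0' :: pvHexDigits (c.toNat + 4) else pvHexDigits (c.toNat + 4)),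
      fold_flatten (fun c => [pvHexTable.getD ((c.toNat + 4) % 16) '0',
        pvHexTable.getD ((c.toNat + 4) / 16) '0'])]
  simp only [List.reverse_nil, List.append_nil, List.nil_append]
  congr 1
  congr 1
  apply List.map_congr_left
  intro c hc
  have hcd : pvDomChar c = true := by
    have := hdom
    unfold Dom_custom_encrypt pvDomStr at this
    rw [List.all_eq_true] at this
    exact this c (List.mem_reverse.mp hc)
  exact chunk_rev_eq _ (dom_code_lt c hcd)
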